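-- pv_equiv track=rewrite | github.com/sanchi191/Plagiarism | Parser/practice.py | remkey
-- ===== SOURCE A (Python) =====
-- keywords = ['auto'	,'break','case',	'char',	'const',	'continue'	,'default',	'do',
-- 'double','else'	,'enum'	,'extern',	'float'	,'for',	'goto',	'if',
-- 'int',	'long',	'register',	'return',	'short',	'signed',	'sizeof',	'static',
-- 'struct',	'switch','typedef', 	'union'	,'unsigned'	,'void'	,'volatile'	,'while']
--
-- def remkey(file):
--     finalstr = ""
--     for i in file:
--         for j in i:
--             if j in keywords:
--                 pass
--             else:
--                 finalstr= finalstr+ " k "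
--     return finalstr
-- ===== SOURCE B (Python) =====
-- KEYWORDS = ['auto','break','case','char','const','continue','default','do',
-- 'double','else','enum','extern','float','for','goto','if',
-- 'int','long','register','return','short','signed','sizeof','static',
-- 'struct','switch','typedef','union','unsigned','void','volatile','while']
--
-- def remkey(file):
--     # staged arithmetic: total token count, then subtract the occurrences of
--     # each keyword (keywords are distinct, so this equals the non-keyword count)
--     non_kw = sum(len(row) for row in file)
--     for k in KEYWORDS:
--         for row in file:
--             non_kw -= row.count(k)
--     return " k " * non_kw
-- ===== Notes on version B (the rewrite author's own statement) =====
-- stated objective: alternative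
-- what changed: Instead of testing every token for keyword membership and concatenating strings, B computes the total token count in one pass, then subtracts the occurrence count of each of the 32 (distinct) keywords via list.count, and emits the result by one closed-form string multiplication.
import Mathlib
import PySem

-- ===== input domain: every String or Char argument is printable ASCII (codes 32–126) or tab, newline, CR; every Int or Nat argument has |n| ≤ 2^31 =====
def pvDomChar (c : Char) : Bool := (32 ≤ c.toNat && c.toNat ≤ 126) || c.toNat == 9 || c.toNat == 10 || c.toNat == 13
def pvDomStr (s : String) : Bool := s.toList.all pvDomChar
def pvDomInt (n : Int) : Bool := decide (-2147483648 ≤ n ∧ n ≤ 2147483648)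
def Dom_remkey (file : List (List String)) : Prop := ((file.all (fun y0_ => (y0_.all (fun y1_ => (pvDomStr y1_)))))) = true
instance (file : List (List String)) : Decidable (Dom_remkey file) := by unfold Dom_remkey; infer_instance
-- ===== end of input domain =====

-- B replaces the per-token membership test and string concatenation by staged
-- arithmetic: total token count minus each keyword's occurrence count, then one
-- closed-form string repetition.

-- ===== PORT A =====
def pvKeywords : List String := ["auto","break","case","char","const","continue","default","do",
  "double","else","enum","extern","float","for","goto","if",
  "int","long","register","return","short","signed","sizeof","static",
  "struct","switch","typedef","union","unsigned","void","volatile","while"]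

def remkey (file : List (List String)) : String :=
  file.foldl (fun finalstr i =>
    i.foldl (fun finalstr j =>
      if j ∈ pvKeywords then finalstr else finalstr ++ " k ") finalstr) ""

-- ===== PORT B =====
-- Python's " k " * n (n ≥ 0; Python yields "" for n ≤ 0, matched by toNat at the call site)
def pvStrTimes (s : String) : Nat → String
  | 0 => ""
  | n + 1 => s ++ pvStrTimes s n

def remkey_alt (file : List (List String)) : String :=
  pvStrTimes " k "
    ((pvKeywords.foldl (fun acc k =>
        file.foldl (fun acc row => acc - (PySem.List.count row k : Int)) acc)
      ((file.map (fun row => (row.length : Int))).sum)).toNat)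

-- ===== PRECONDITION & SPEC =====
def Spec_remkey (file : List (List String)) (out : String) : Prop := out = remkey_alt file
instance (file : List (List String)) (out : String) : Decidable (Spec_remkey file out) := by unfold Spec_remkey; infer_instance

-- ===== CLAIM (what is proved, stated in full; the proofs are below) =====
def Claim_equal_remkey : Prop := ∀ (file : List (List String)), Dom_remkey file → Spec_remkey file (remkey file)

-- ===== LEMMAS AND PROOFS =====

theorem pvStrTimes_add (s : String) (m n : Nat) :
    pvStrTimes s (m + n) = pvStrTimes s m ++ pvStrTimes s n := by
  induction m with
  | zero => simp [pvStrTimes]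
  | succ k ih =>
      rw [Nat.succ_add]
      simp [pvStrTimes, ih, String.append_assoc]

theorem pvKeywords_nodup : pvKeywords.Nodup := by decide

-- A's inner loop appends " k " once per non-keyword token
theorem pvInner (row : List String) (acc : String) :
    row.foldl (fun finalstr j => if j ∈ pvKeywords then finalstr else finalstr ++ " k ") acc
      = acc ++ pvStrTimes " k " (row.filter (fun j => !(decide (j ∈ pvKeywords)))).length := by
  induction row generalizing acc with
  | nil => simp [pvStrTimes]
  | cons j rest ih =>
      simp only [List.foldl_cons, List.filter_cons]
      by_cases h : j ∈ pvKeywords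
      · simp [h, ih]
      · rw [if_neg h, ih]
        simp only [h, decide_false, Bool.not_false, if_pos, List.length_cons]
        rw [Nat.add_comm _ 1, pvStrTimes_add, String.append_assoc]
        rfl

theorem pvOuter (file : List (List String)) (acc : String) :
    file.foldl (fun finalstr i =>
      i.foldl (fun finalstr j => if j ∈ pvKeywords then finalstr else finalstr ++ " k ") finalstr) acc
    = acc ++ pvStrTimes " k " ((file.map (fun row => (row.filter (fun j => !(decide (j ∈ pvKeywords)))).length)).sum) := by
  induction file generalizing acc with
  | nil => simp [pvStrTimes]
  | cons row rest ih =>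
      simp only [List.foldl_cons, List.map_cons, List.sum_cons]
      rw [pvInner, ih, pvStrTimes_add, String.append_assoc]

-- a left fold subtracting g x is subtracting the sum
theorem pvFoldlSub {α : Type} (l : List α) (g : α → Int) (a0 : Int) :
    l.foldl (fun a x => a - g x) a0 = a0 - (l.map g).sum := by
  induction l generalizing a0 with
  | nil => simp
  | cons x t ih =>
      simp only [List.foldl_cons, List.map_cons, List.sum_cons]
      rw [ih]; ring

-- B's double loop subtracts the double sum
theorem pvOuterB (K : List String) (file : List (List String)) (a0 : Int) :
    K.foldl (fun acc k => file.foldl (fun acc row => acc - (PySem.List.count row k : Int)) acc) a0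
      = a0 - (K.map (fun k => (file.map (fun row => (PySem.List.count row k : Int))).sum)).sum := by
  induction K generalizing a0 with
  | nil => simp
  | cons k t ih =>
      simp only [List.foldl_cons, List.map_cons, List.sum_cons]
      rw [pvFoldlSub, ih]; ring

-- summing over a distinct list K the counts in j :: t adds the indicator of j
theorem pvSumCountCons (K : List String) (hK : K.Nodup) (j : String) (t : List String) :
    (K.map (fun k => (PySem.List.count (j :: t) k : Int))).sum
      = (K.map (fun k => (PySem.List.count t k : Int))).sum
        + (if j ∈ K then 1 else 0) := by
  induction K with
  | nil => simp
  | cons k K ih =>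
      have hnd : K.Nodup := hK.of_cons
      have hkK : k ∉ K := (List.nodup_cons.mp hK).1
      have hcnt : (PySem.List.count (j :: t) k : Int)
          = (PySem.List.count t k : Int) + (if j = k then 1 else 0) := by
        rw [PySem.List.count_eq, PySem.List.count_eq, List.count_cons]
        push_cast
        by_cases h : j = k
        · rw [if_pos h, if_pos (beq_iff_eq.mpr h)]
        · rw [if_neg h, if_neg (fun hb => h (beq_iff_eq.mp hb))]
      simp only [List.map_cons, List.sum_cons, ih hnd, hcnt]
      by_cases h : j = k
      · subst h
        rw [if_pos rfl, if_neg hkK, if_pos (List.mem_cons_self)]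
        ring
      · rw [if_neg h]
        by_cases hm : j ∈ K
        · rw [if_pos hm, if_pos (List.mem_cons_of_mem k hm)]; ring
        · rw [if_neg hm, if_neg (by
            intro hc; rcases List.mem_cons.mp hc with h1 | h1
            · exact h h1
            · exact hm h1)]
          ring

-- per row: length minus keyword occurrences = number of non-keyword tokens
theorem pvRowLem (row : List String) :
    (row.length : Int) - (pvKeywords.map (fun k => (PySem.List.count row k : Int))).sum
      = ((row.filter (fun j => !(decide (j ∈ pvKeywords)))).length : Int) := by
  induction row with
  | nil => simp [PySem.List.count_eq]
  | cons j t ih =>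
      rw [pvSumCountCons pvKeywords pvKeywords_nodup]
      simp only [List.length_cons, List.filter_cons]
      by_cases h : j ∈ pvKeywords
      · simp only [h, if_pos, decide_true, Bool.not_true, if_neg (by simp : ¬ (false = true))]
        push_cast
        omega
      · simp only [h, decide_false, Bool.not_false, if_pos, List.length_cons]
        push_cast
        omega

-- the Int computed by B equals the Nat counted by A
theorem pvTotal (file : List (List String)) :
    (file.map (fun row => (row.length : Int))).sum
      - (pvKeywords.map (fun k => (file.map (fun row => (PySem.List.count row k : Int))).sum)).sum
    = (((file.map (fun row => (row.filter (fun j => !(decide (j ∈ pvKeywords)))).length)).sum : Nat) : Int) := by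
  induction file with
  | nil => simp
  | cons row rest ih =>
      have swap : ∀ (K : List String) (r : List String) (R : List (List String)),
          (K.map (fun k => ((PySem.List.count r k : Int) + (R.map (fun row => (PySem.List.count row k : Int))).sum))).sum
            = (K.map (fun k => (PySem.List.count r k : Int))).sum
              + (K.map (fun k => (R.map (fun row => (PySem.List.count row k : Int))).sum)).sum := by
        intro K r R
        exact PySem.List.sum_map_add_int K _ _
      simp only [List.map_cons, List.sum_cons]
      rw [swap pvKeywords row rest]
      have := pvRowLem row
      push_cast
      push_cast at ih this
      linarith

-- ===== VERDICT (by name: the statement is the Claim_ definition above) =====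
theorem remkey_spec : Claim_equal_remkey := by
  intro file _
  unfold Spec_remkey remkey remkey_alt
  rw [pvOuter, pvOuterB, pvTotal, Int.toNat_natCast]
  simp
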